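-- pv_equiv track=rewrite | github.com/CompGenomeLab/xr-ds-seq-snakemake | workflow/scripts/csv2config.py | duplicateSamples
-- ===== SOURCE A (Python) =====
-- def duplicateSamples(listInfo):
--
--     sampleInfoList = [[]]
--     for info in listInfo:
--         semicolon = info.count(";")
--         infoList = [info]
--
--         if semicolon > 0:
--             infoList = info.strip().split(";")
--
--             tempList = []
--             for spltInfo in infoList:
--                 for subList in sampleInfoList:
--                     subListemp = subList[:]
--                     subListemp.append(spltInfo)
--                     tempList.append(subListemp)
--
--             sampleInfoList = []
--             for subList in tempList:
--                 sampleInfoList.append(subList)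
--
--         else:
--             for subList in sampleInfoList:
--                 subList.append(info)
--
--     return sampleInfoList
-- ===== SOURCE B (Python) =====
-- def duplicateSamples(listInfo):
--     options = [info.strip().split(";") if info.count(";") > 0 else [info]
--                for info in listInfo]
--     strides = []
--     total = 1
--     for opts in options:
--         strides.append(total)
--         total *= len(opts)
--     return [[opts[(r // stride) % len(opts)] for opts, stride in zip(options, strides)]
--             for r in range(total)]
-- ===== Notes on version B (the rewrite author's own statement) =====
-- stated objective: alternative
-- what changed: Instead of incrementally rebuilding the whole combination list field by field (option-outer/combination-inner nested loops plus a copy loop), B precomputes each field's option list and a stride per field and emits each output row directly by closed-form indexing options[i][(r // stride_i) % len_i] for r in range(product of lengths).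
import Mathlib
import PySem

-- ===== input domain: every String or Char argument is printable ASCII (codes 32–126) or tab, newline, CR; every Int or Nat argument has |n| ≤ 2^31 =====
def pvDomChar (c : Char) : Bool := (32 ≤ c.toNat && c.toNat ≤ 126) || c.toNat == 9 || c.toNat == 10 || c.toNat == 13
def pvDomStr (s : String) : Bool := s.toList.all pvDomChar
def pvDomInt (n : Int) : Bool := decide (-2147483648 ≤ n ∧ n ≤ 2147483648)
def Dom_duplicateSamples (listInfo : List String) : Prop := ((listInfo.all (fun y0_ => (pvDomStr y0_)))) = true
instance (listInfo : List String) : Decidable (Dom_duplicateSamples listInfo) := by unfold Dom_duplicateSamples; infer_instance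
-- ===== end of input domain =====

-- ===== PORT A =====
-- B returns the same value but precomputes each field's option list and emits each output row by
-- closed-form stride indexing instead of rebuilding the whole combination list per field (objective: alternative).
-- Both ports call str.split(";"): sep = ";" is never empty, so PySem.Str.split? always returns `some`; the getD [] default is never hit.
def pySplitSemi (s : String) : List String := (PySem.Str.split? s ";").getD []

-- Literal port of A: fold over the fields; a multi-option field rebuilds the whole list
-- (outer loop over the split options, inner over the accumulated combinations, then a copy loop);
-- a single-option field appends the field to every accumulated combination in place (value semantics: map).
def duplicateSamples (listInfo : List String) : List (List String) :=
  listInfo.foldl (fun sampleInfoList info =>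
    let semicolon := PySem.Str.count info ";"
    if semicolon > 0 then
      let infoList := pySplitSemi (PySem.Str.strip info)
      let tempList := infoList.foldl (fun tempList spltInfo =>
        sampleInfoList.foldl (fun tempList subList => tempList ++ [subList ++ [spltInfo]]) tempList) []
      tempList.foldl (fun acc subList => acc ++ [subList]) []
    else
      sampleInfoList.map (fun subList => subList ++ [info])) [[]]

-- ===== PORT B =====
-- Port of B: precompute the option list for each field and a stride per field, then build each
-- output row directly by closed-form indexing: row r takes options[i][(r // stride_i) % len_i].
-- (The getD default "" is never consulted: when a row index r exists, every field has length ≥ 1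
-- and the index (r // stride) % len is in range, exactly as in the Python.)
def duplicateSamples_alt (listInfo : List String) : List (List String) :=
  let options := listInfo.map (fun info =>
    if PySem.Str.count info ";" > 0 then pySplitSemi (PySem.Str.strip info) else [info])
  let st := options.foldl (fun (p : List Int × Int) opts => (p.1 ++ [p.2], p.2 * (opts.length : Int))) ([], 1)
  let strides := st.1
  let total := st.2
  (PySem.List.pyRange 0 total 1).map (fun r =>
    (options.zip strides).map (fun p =>
      PySem.List.pyGetD p.1 (PySem.Int.mod (PySem.Int.floordiv r p.2) (p.1.length : Int)) ""))

-- ===== PRECONDITION & SPEC =====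
def Spec_duplicateSamples (listInfo : List String) (out : List (List String)) : Prop := out = duplicateSamples_alt listInfo
instance (listInfo : List String) (out : List (List String)) : Decidable (Spec_duplicateSamples listInfo out) := by unfold Spec_duplicateSamples; infer_instance

-- ===== CLAIM (what is proved, stated in full; the proofs are below) =====
def Claim_equal_duplicateSamples : Prop := ∀ (listInfo : List String), Dom_duplicateSamples listInfo → Spec_duplicateSamples listInfo (duplicateSamples listInfo)

-- ===== LEMMAS AND PROOFS =====

-- the option list of one field (the shape both ports share)
def pvOpts (info : String) : List String :=
  if PySem.Str.count info ";" > 0 then pySplitSemi (PySem.Str.strip info) else [info]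

-- the foldr-shaped Cartesian product (later fields vary slower), the common reference value
def pvProd (os : List (List String)) : List (List String) :=
  os.foldr (fun o acc => acc.flatMap (fun c => o.map (fun x => x :: c))) [[]]

-- A's per-field step, normalised: both branches are a flatMap over the field's options
lemma stepA_eq (s : List (List String)) (info : String) :
    (if PySem.Str.count info ";" > 0 then
       List.foldl (fun acc subList => acc ++ [subList]) []
         (List.foldl (fun tempList spltInfo =>
             List.foldl (fun tempList subList => tempList ++ [subList ++ [spltInfo]]) tempList s)
           [] (pySplitSemi (PySem.Str.strip info)))
     else s.map (fun subList => subList ++ [info]))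
    = (pvOpts info).flatMap (fun x => s.map (fun u => u ++ [x])) := by
  unfold pvOpts
  split_ifs with h
  · rw [PySem.List.foldl_append_singleton]
    rw [show (fun (tempList : List (List String)) (spltInfo : String) =>
          List.foldl (fun tempList subList => tempList ++ [subList ++ [spltInfo]]) tempList s)
        = fun tempList spltInfo => tempList ++ s.map (fun u => u ++ [spltInfo]) from
        funext fun t => funext fun y => PySem.List.foldl_append_singleton_eq_map _ s t]
    rw [PySem.List.foldl_append_eq_flatMap]
    simp
  · simp

-- invariant of A's loop: starting from any state s it computes the product of the remaining
-- option lists, each combination appended to every element of s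
lemma foldA (li : List String) (s : List (List String)) :
    li.foldl (fun s info => (pvOpts info).flatMap (fun x => s.map (fun u => u ++ [x]))) s
      = (pvProd (li.map pvOpts)).flatMap (fun c => s.map (fun u => u ++ c)) := by
  induction li generalizing s with
  | nil => simp [pvProd]
  | cons info rest ih =>
      simp only [List.foldl_cons, List.map_cons, pvProd, List.foldr_cons] at *
      rw [ih]
      simp [List.map_flatMap, List.flatMap_map, List.flatMap_assoc, List.map_map,
            Function.comp_def, List.append_assoc]

lemma A_eq (li : List String) : duplicateSamples li = pvProd (li.map pvOpts) := by
  unfold duplicateSamples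
  rw [show (fun (sampleInfoList : List (List String)) (info : String) =>
        let semicolon := PySem.Str.count info ";"
        if semicolon > 0 then
          let infoList := pySplitSemi (PySem.Str.strip info)
          let tempList := infoList.foldl (fun tempList spltInfo =>
            sampleInfoList.foldl (fun tempList subList => tempList ++ [subList ++ [spltInfo]]) tempList) []
          tempList.foldl (fun acc subList => acc ++ [subList]) []
        else
          sampleInfoList.map (fun subList => subList ++ [info]))
      = fun s info => (pvOpts info).flatMap (fun x => s.map (fun u => u ++ [x])) from
      funext fun s => funext fun info => stepA_eq s info]
  rw [foldA]
  simp

-- total number of combinations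
def pvT (os : List (List String)) : Nat := os.foldr (fun o n => o.length * n) 1

-- row k of the product, built field by field (earlier fields cycle more quickly)
def pvRow : List (List String) → Nat → List String
  | [], _ => []
  | o :: rest, k => o.getD (k % o.length) "" :: pvRow rest (k / o.length)

-- the stride list B's loop computes, starting from base stride b
def pvStrideList : List (List String) → Nat → List Int
  | [], _ => []
  | o :: rest, b => ((b : Nat) : Int) :: pvStrideList rest (b * o.length)

lemma map_eq_map_range {β : Type} (o : List String) (f : String → β) :
    o.map f = (List.range o.length).map (fun i => f (o.getD i "")) := by
  induction o with
  | nil => simp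
  | cons x xs ih => simp [List.range_succ_eq_map, ih, List.map_map, Function.comp_def]

lemma range_mul_map {β : Type} (L T : Nat) (g : Nat → β) :
    (List.range (L * T)).map g
      = (List.range T).flatMap (fun t => (List.range L).map (fun i => g (t * L + i))) := by
  induction T with
  | zero => simp
  | succ T ih =>
      rw [List.range_succ, Nat.mul_succ, List.range_add, List.map_append, ih]
      simp [List.map_map, Function.comp_def, Nat.mul_comm]

-- the product, characterised row by row
lemma prod_eq (os : List (List String)) :
    pvProd os = (List.range (pvT os)).map (pvRow os) := by
  induction os with
  | nil => simp [pvProd, pvT, pvRow]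
  | cons o rest ih =>
      show (pvProd rest).flatMap (fun c => o.map (fun x => x :: c)) = _
      rw [ih, List.flatMap_map]
      show _ = (List.range (o.length * pvT rest)).map (pvRow (o :: rest))
      rw [range_mul_map o.length (pvT rest) (pvRow (o :: rest))]
      simp only [List.flatMap_def]
      refine congrArg List.flatten (List.map_congr_left fun t _ => ?_)
      rw [map_eq_map_range o (fun x => x :: pvRow rest t)]
      refine List.map_congr_left fun i hi => ?_
      have hiL : i < o.length := List.mem_range.mp hi
      have hL : 0 < o.length := Nat.lt_of_le_of_lt (Nat.zero_le i) hiL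
      show o.getD i "" :: pvRow rest t = pvRow (o :: rest) (t * o.length + i)
      simp only [pvRow]
      rw [Nat.mul_comm t o.length, Nat.mul_add_mod, Nat.mod_eq_of_lt hiL,
          Nat.mul_add_div hL, Nat.div_eq_of_lt hiL, Nat.add_zero]

-- B's stride loop, solved: it appends the stride list and multiplies up the total
lemma strides_spec (os : List (List String)) (acc : List Int) (b : Nat) :
    os.foldl (fun (p : List Int × Int) o => (p.1 ++ [p.2], p.2 * (o.length : Int))) (acc, ((b : Nat) : Int))
      = (acc ++ pvStrideList os b, ((b * pvT os : Nat) : Int)) := by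
  induction os generalizing acc b with
  | nil => simp [pvStrideList, pvT]
  | cons o rest ih =>
      simp only [List.foldl_cons]
      rw [show ((b : Int) * (o.length : Int)) = (((b * o.length : Nat) : Nat) : Int) by push_cast; ring]
      rw [ih (acc ++ [(b : Int)]) (b * o.length)]
      simp only [show pvStrideList (o :: rest) b = ((b : Nat) : Int) :: pvStrideList rest (b * o.length) from rfl,
                 show pvT (o :: rest) = o.length * pvT rest from rfl]
      simp [Nat.mul_assoc]

-- B's row expression over zip equals the recursive row (division folds through the strides)
lemma ziprow (os : List (List String)) (b k : Nat) :
    (os.zip (pvStrideList os b)).map (fun p =>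
        PySem.List.pyGetD p.1 (PySem.Int.mod (PySem.Int.floordiv ((k : Nat) : Int) p.2) (p.1.length : Int)) "")
      = pvRow os (k / b) := by
  induction os generalizing b k with
  | nil => simp [pvStrideList, pvRow]
  | cons o rest ih =>
      unfold pvStrideList pvRow
      simp only [List.zip_cons_cons, List.map_cons]
      rw [PySem.Int.floordiv_natCast, PySem.Int.mod_natCast, PySem.List.pyGetD_natCast]
      rw [ih (b * o.length) k, Nat.div_div_eq_div_mul]

lemma B_eq (li : List String) : duplicateSamples_alt li = pvProd (li.map pvOpts) := by
  rw [prod_eq]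
  show (PySem.List.pyRange 0
      (li.map pvOpts |>.foldl (fun (p : List Int × Int) o => (p.1 ++ [p.2], p.2 * (o.length : Int))) ([], 1)).2 1).map
      (fun r => ((li.map pvOpts).zip
        ((li.map pvOpts |>.foldl (fun (p : List Int × Int) o => (p.1 ++ [p.2], p.2 * (o.length : Int))) ([], 1)).1)).map
        (fun p => PySem.List.pyGetD p.1 (PySem.Int.mod (PySem.Int.floordiv r p.2) (p.1.length : Int)) ""))
    = (List.range (pvT (li.map pvOpts))).map (pvRow (li.map pvOpts))
  rw [show (([], (1 : Int)) : List Int × Int) = (([] : List Int), (((1 : Nat) : Nat) : Int)) by norm_num]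
  rw [strides_spec (li.map pvOpts) [] 1]
  simp only [List.nil_append, Nat.one_mul]
  rw [PySem.List.pyRange_zero_nat, List.map_map]
  refine List.map_congr_left fun k _ => ?_
  show _ = pvRow (li.map pvOpts) k
  rw [Function.comp_apply]
  rw [ziprow (li.map pvOpts) 1 k, Nat.div_one]

-- ===== VERDICT (by name: the statement is the Claim_ definition above) =====
theorem duplicateSamples_spec : Claim_equal_duplicateSamples := by
  intro listInfo _
  unfold Spec_duplicateSamples
  rw [A_eq, B_eq]
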